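-- pv_equiv track=rewrite | github.com/twothicc/Credit_Suisse | GEH1036.py | checking_product
-- ===== SOURCE A (Python) =====
-- def checking_product(a, b, c) :
-- 	def helper(v) :
-- 		v = str(v)
-- 		while len(v) > 1 :
-- 			result = 0
-- 			for i in v :
-- 				result += int(i)
-- 			v = str(result)
-- 		return int(v)
-- 	return ((helper(a) * helper(b)) % 9) == (helper(c) % 9)
-- ===== SOURCE B (Python) =====
-- def checking_product(a, b, c):
--     def digital_root(v):
--         return 0 if v == 0 else 1 + (v - 1) % 9
--     return ((digital_root(a) * digital_root(b)) % 9) == (digital_root(c) % 9)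
-- ===== Notes on version B (the rewrite author's own statement) =====
-- stated objective: simpler
-- what changed: Replaces A's repeated string-conversion digit-sum loop by the closed-form digital root 0 if v==0 else 1+(v-1)%9, keeping the outer mod-9 comparison.
import Mathlib
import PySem

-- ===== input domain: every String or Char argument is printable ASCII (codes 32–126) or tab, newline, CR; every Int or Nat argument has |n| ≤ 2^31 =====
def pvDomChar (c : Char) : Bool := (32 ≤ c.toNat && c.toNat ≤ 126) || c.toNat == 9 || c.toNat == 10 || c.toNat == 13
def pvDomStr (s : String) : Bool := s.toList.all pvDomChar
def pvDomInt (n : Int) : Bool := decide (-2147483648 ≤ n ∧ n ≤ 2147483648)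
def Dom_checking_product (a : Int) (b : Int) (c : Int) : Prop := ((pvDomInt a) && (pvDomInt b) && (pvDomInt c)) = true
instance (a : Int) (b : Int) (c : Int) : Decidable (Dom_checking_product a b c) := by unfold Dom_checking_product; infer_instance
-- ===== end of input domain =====

-- B replaces A's repeated str-and-digit-sum loop by the closed-form digital root 0 / 1+(v-1)%9 (simpler, no string conversion).

-- ===== PORT A =====
-- int(i) for one character of str(v); `none` is Python's ValueError (the '-' of a
-- negative argument), excluded by Pre_checking_product
def pvDigitVal (c : Char) : Int := (PySem.Int.ofChars? [c]).getD 0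

-- 'result = 0; for i in v: result += int(i)'
def pvSumA (s : List Char) : Int := s.foldl (fun r c => r + pvDigitVal c) 0

-- 'while len(v) > 1: … v = str(result)' on the string state; the fuel only makes the
-- loop total (inside Pre_ the supplied fuel is always sufficient, see pvLoopA_eq below)
def pvLoopA : Nat → List Char → List Char
  | 0, s => s
  | f+1, s => if s.length > 1 then pvLoopA f (PySem.Int.toChars (pvSumA s)) else s

-- helper(v): v = str(v); loop; return int(v)
def pvHelperA (v : Int) : Int :=
  (PySem.Int.ofChars? (pvLoopA (v.natAbs + 1) (PySem.Int.toChars v))).getD 0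

def checking_product (a : Int) (b : Int) (c : Int) : Bool :=
  PySem.Int.mod (pvHelperA a * pvHelperA b) 9 == PySem.Int.mod (pvHelperA c) 9

-- ===== PORT B =====
def pvDigitalRoot (v : Int) : Int := if v = 0 then 0 else 1 + PySem.Int.mod (v - 1) 9

def checking_product_alt (a : Int) (b : Int) (c : Int) : Bool :=
  PySem.Int.mod (pvDigitalRoot a * pvDigitalRoot b) 9 == PySem.Int.mod (pvDigitalRoot c) 9

-- ===== PRECONDITION & SPEC =====
-- Pre_ excludes exactly the inputs on which A raises: any negative argument makes
-- helper call int('-') on the sign character of str(v), a ValueError.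
def Pre_checking_product (a : Int) (b : Int) (c : Int) : Prop := 0 ≤ a ∧ 0 ≤ b ∧ 0 ≤ c
instance (a : Int) (b : Int) (c : Int) : Decidable (Pre_checking_product a b c) := by
  unfold Pre_checking_product; infer_instance

def pvWitness_checking_product : Int × Int × Int := (12, 34, 56)

def Spec_checking_product (a : Int) (b : Int) (c : Int) (out : Bool) : Prop :=
  out = checking_product_alt a b c
instance (a : Int) (b : Int) (c : Int) (out : Bool) : Decidable (Spec_checking_product a b c out) := by
  unfold Spec_checking_product; infer_instance

-- ===== CLAIM (what is proved, stated in full; the proofs are below) =====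
def Claim_equal_checking_product : Prop := ∀ (a : Int) (b : Int) (c : Int), Dom_checking_product a b c → Pre_checking_product a b c → Spec_checking_product a b c (checking_product a b c)

-- ===== LEMMAS AND PROOFS =====

theorem pvMod9_eq (x : Int) : PySem.Int.mod x 9 = x % 9 := by
  simp [PySem.Int.mod, Int.fmod_eq_emod]

theorem pvToChars_natCast (n : ℕ) : PySem.Int.toChars (n : Int) = Nat.toDigits 10 n := by
  simp [PySem.Int.toChars]

-- bridge from core's Nat.toDigits to Mathlib's Nat.digits
theorem pvToDigitsCore_eq (n : ℕ) : 1 ≤ n → ∀ f ds, n ≤ f →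
    Nat.toDigitsCore 10 (f + 1) n ds = ((Nat.digits 10 n).map Nat.digitChar).reverse ++ ds := by
  induction n using Nat.strong_induction_on with
  | _ n ih =>
    intro hn f ds hf
    rw [Nat.toDigitsCore]
    by_cases h10 : n / 10 = 0
    · simp only [h10, if_true]
      rw [Nat.digits_def' (by norm_num) (by omega), h10]
      simp
    · have hge : 10 ≤ n := by omega
      have hf' : 1 ≤ f := by omega
      rw [if_neg h10]
      obtain ⟨f', rfl⟩ : ∃ f', f = f' + 1 := ⟨f - 1, by omega⟩
      rw [ih (n / 10) (by omega) (by omega) f' _ (by omega)]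
      conv_rhs => rw [Nat.digits_def' (b := 10) (by norm_num) (show 0 < n by omega)]
      simp

theorem pvToDigits_eq (n : ℕ) (hn : 1 ≤ n) :
    Nat.toDigits 10 n = ((Nat.digits 10 n).map Nat.digitChar).reverse := by
  have := pvToDigitsCore_eq n hn n [] le_rfl
  simpa [Nat.toDigits] using this

theorem pvDigitVal_digitChar (d : ℕ) (hd : d < 10) : pvDigitVal (Nat.digitChar d) = (d : Int) := by
  interval_cases d <;> decide

theorem pvSumA_eq (s : List Char) : pvSumA s = (s.map pvDigitVal).sum := by
  simp [pvSumA, List.sum_eq_foldl, List.foldl_map]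

theorem pvSumMapVal (l : List ℕ) (h : ∀ d ∈ l, d < 10) :
    (l.map (pvDigitVal ∘ Nat.digitChar)).sum = (l.sum : Int) := by
  induction l with
  | nil => simp
  | cons x xs ihx =>
    simp only [List.map_cons, List.sum_cons, Function.comp_apply]
    rw [pvDigitVal_digitChar x (h x (by simp)), ihx (fun d hd => h d (by simp [hd]))]
    push_cast
    ring

theorem pvSumA_digits (n : ℕ) (hn : 1 ≤ n) :
    pvSumA (((Nat.digits 10 n).map Nat.digitChar).reverse) = ((Nat.digits 10 n).sum : Int) := by
  rw [pvSumA_eq, List.map_reverse, List.sum_reverse, List.map_map]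
  exact pvSumMapVal _ (fun d hd => Nat.digits_lt_base (by norm_num) hd)

theorem pvDigitsSum_le (n : ℕ) : (Nat.digits 10 n).sum ≤ n := by
  induction n using Nat.strong_induction_on with
  | _ n ih =>
    rcases Nat.eq_zero_or_pos n with h | h
    · simp [h]
    · rw [Nat.digits_def' (by norm_num) h]
      have := ih (n / 10) (by omega)
      simp only [List.sum_cons]
      omega

theorem pvDigitsSum_lt (n : ℕ) (hn : 10 ≤ n) : (Nat.digits 10 n).sum < n := by
  rw [Nat.digits_def' (by norm_num) (by omega)]
  have := pvDigitsSum_le (n / 10)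
  simp only [List.sum_cons]
  omega

theorem pvDigitsSum_pos (n : ℕ) (hn : 1 ≤ n) : 1 ≤ (Nat.digits 10 n).sum := by
  induction n using Nat.strong_induction_on with
  | _ n ih =>
    rw [Nat.digits_def' (by norm_num) (by omega)]
    rcases Nat.eq_zero_or_pos (n % 10) with h | h
    · have h10 : 10 ≤ n := by omega
      have := ih (n / 10) (by omega) (by omega)
      simp only [List.sum_cons]
      omega
    · simp only [List.sum_cons]
      omega

theorem pvLen_one (n : ℕ) (hn : n ≤ 9) : (Nat.toDigits 10 n).length = 1 := by
  interval_cases n <;> decide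

theorem pvLen_gt (n : ℕ) (hn : 10 ≤ n) : 1 < (Nat.toDigits 10 n).length := by
  rw [pvToDigits_eq n (by omega), Nat.digits_def' (by norm_num) (by omega)]
  have : Nat.digits 10 (n / 10) ≠ [] := Nat.digits_ne_nil_iff_ne_zero.mpr (by omega)
  simp only [List.length_reverse, List.length_map, List.length_cons]
  have := List.length_pos_iff.mpr this
  omega

theorem pvDroot_small (n : ℕ) (hn : n ≤ 9) : pvDigitalRoot (n : Int) = (n : Int) := by
  unfold pvDigitalRoot
  rw [pvMod9_eq]
  split_ifs with h
  · omega
  · have : (n : Int) ≠ 0 := h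
    omega

theorem pvDroot_congr (m n : ℕ) (hm : 1 ≤ m) (hn : 1 ≤ n) (h : m ≡ n [MOD 9]) :
    pvDigitalRoot (m : Int) = pvDigitalRoot (n : Int) := by
  unfold pvDigitalRoot
  rw [pvMod9_eq, pvMod9_eq]
  have h9 : (m : Int) % 9 = (n : Int) % 9 := by
    have h' : m % 9 = n % 9 := h
    omega
  split_ifs with h1 h2 h2 <;> omega

theorem pvLoopA_eq (n : ℕ) : ∀ f, n ≤ f →
    pvLoopA f (PySem.Int.toChars (n : Int)) = PySem.Int.toChars (pvDigitalRoot (n : Int)) := by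
  induction n using Nat.strong_induction_on with
  | _ n ih =>
    intro f hf
    by_cases hs : n ≤ 9
    · rw [pvDroot_small n hs, pvToChars_natCast]
      have hlen := pvLen_one n hs
      cases f with
      | zero => rfl
      | succ f' => simp [pvLoopA, hlen]
    · have h10 : 10 ≤ n := by omega
      obtain ⟨f', rfl⟩ : ∃ f', f = f' + 1 := ⟨f - 1, by omega⟩
      have hlen : 1 < (PySem.Int.toChars (n : Int)).length := by
        rw [pvToChars_natCast]; exact pvLen_gt n h10
      rw [pvLoopA, if_pos hlen]
      have hsum : pvSumA (PySem.Int.toChars (n : Int)) = ((Nat.digits 10 n).sum : Int) := by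
        rw [pvToChars_natCast, pvToDigits_eq n (by omega)]
        exact pvSumA_digits n (by omega)
      rw [hsum]
      have hlt := pvDigitsSum_lt n h10
      have hpos := pvDigitsSum_pos n (by omega)
      rw [ih _ hlt f' (by omega)]
      exact congrArg _ (pvDroot_congr _ n hpos (by omega) (Nat.modEq_nine_digits_sum n).symm)

theorem pvRoundtrip (r : Int) (h1 : 0 ≤ r) (h2 : r ≤ 9) :
    (PySem.Int.ofChars? (PySem.Int.toChars r)).getD 0 = r := by
  interval_cases r <;> decide

theorem pvDroot_bounds (v : Int) : 0 ≤ pvDigitalRoot v ∧ pvDigitalRoot v ≤ 9 := by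
  unfold pvDigitalRoot
  rw [pvMod9_eq]
  split_ifs with h
  · omega
  · constructor <;> omega

theorem pvHelperA_eq (v : Int) (hv : 0 ≤ v) : pvHelperA v = pvDigitalRoot v := by
  obtain ⟨n, rfl⟩ : ∃ n : ℕ, v = (n : Int) := ⟨v.toNat, by omega⟩
  unfold pvHelperA
  have hfuel : n ≤ (n : Int).natAbs + 1 := by omega
  rw [pvLoopA_eq n _ hfuel]
  exact pvRoundtrip _ (pvDroot_bounds _).1 (pvDroot_bounds _).2

-- ===== VERDICT (by name: the statement is the Claim_ definition above) =====
theorem checking_product_spec : Claim_equal_checking_product := by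
  intro a b c _ hpre
  obtain ⟨ha, hb, hc⟩ := hpre
  unfold Spec_checking_product checking_product checking_product_alt
  rw [pvHelperA_eq a ha, pvHelperA_eq b hb, pvHelperA_eq c hc]
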